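-- pv_equiv track=rewrite | github.com/bachkhoabk47/telegram-getmessage | test/conect_test.py | splitNumberString
-- ===== SOURCE A (Python) =====
-- def splitNumberString(string,count,list_coint)->dict():
--     numStr =dict()
--     Quanlity= ""
--     CoinType =""
--     for a in string:
--         if (a.isnumeric()) == True:
--             Quanlity += str(a)
--         else:
--             CoinType += str(a)
--         if a.upper() == 'K':
--             Quanlity = Quanlity + '000'
--             CoinType = ''
--     numStr['Quanlity'+str(count)]=Quanlity
--     if CoinType.upper() in list_coint:
--         numStr['CoinType'+str(count)]=CoinType
--     return numStr
-- ===== SOURCE B (Python) =====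
-- def splitNumberString(string, count, list_coint):
--     # Quanlity: one stream-order join over the characters.
--     Quanlity = ''.join(
--         '000' if c in 'Kk' else (c if c.isnumeric() else '')
--         for c in string)
--     # CoinType: the non-numeric characters after the last K/k (whole string if none),
--     # found by scanning from the right.
--     kept = []
--     for c in reversed(string):
--         if c in 'Kk':
--             break
--         kept.append(c)
--     CoinType = ''.join(c for c in reversed(kept) if not c.isnumeric())
--     numStr = {'Quanlity' + str(count): Quanlity}
--     if CoinType.upper() in list_coint:
--         numStr['CoinType' + str(count)] = CoinType
--     return numStr
-- ===== Notes on version B (the rewrite author's own statement) =====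
-- stated objective: simpler
-- what changed: A's single interleaved pass with a shared accumulate-and-reset state is replaced by two independent computations: the quantity as one direct per-character join, and the coin type as the non-digit characters after the last K/k found by a right-to-left scan.
import Mathlib
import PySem

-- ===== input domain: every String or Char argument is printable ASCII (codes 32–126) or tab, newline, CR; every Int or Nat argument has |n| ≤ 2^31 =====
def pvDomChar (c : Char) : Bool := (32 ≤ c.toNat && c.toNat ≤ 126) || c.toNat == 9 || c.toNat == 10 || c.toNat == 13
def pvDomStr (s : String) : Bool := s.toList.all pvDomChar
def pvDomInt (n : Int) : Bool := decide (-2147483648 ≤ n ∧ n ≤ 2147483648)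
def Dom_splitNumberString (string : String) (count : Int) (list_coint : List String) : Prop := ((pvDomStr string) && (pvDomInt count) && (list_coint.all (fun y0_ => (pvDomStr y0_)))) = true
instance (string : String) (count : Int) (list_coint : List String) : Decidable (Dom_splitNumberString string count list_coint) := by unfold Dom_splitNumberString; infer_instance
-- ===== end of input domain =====

-- B replaces A's single interleaved accumulate-and-reset pass with a direct join for the
-- quantity plus a right-to-left scan to the last K/k for the coin type (objective: simpler
-- decomposition, same cost). '.isnumeric()' is ported as PySem.Chars.isdigit, exact on the
-- ASCII domain these theorems are about.

-- ===== PORT A =====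
-- one iteration of A's for-loop over (Quanlity, CoinType)
def pvStepA (st : List Char × List Char) (a : Char) : List Char × List Char :=
  let st1 := if PySem.Chars.isdigit a then (st.1 ++ [a], st.2) else (st.1, st.2 ++ [a])
  if PySem.Chars.upperChar a = 'K' then (st1.1 ++ ['0', '0', '0'], []) else st1

def splitNumberString (string : String) (count : Int) (list_coint : List String) : List (String × String) :=
  let st := string.toList.foldl pvStepA ([], [])
  let numStr : PySem.Dict String String :=
    PySem.Dict.empty.insert ("Quanlity" ++ PySem.Int.toStr count) (String.ofList st.1)
  let numStr :=
    if list_coint.contains (PySem.Str.upper (String.ofList st.2)) then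
      numStr.insert ("CoinType" ++ PySem.Int.toStr count) (String.ofList st.2)
    else numStr
  numStr.items

-- ===== PORT B =====
def pvIsK (c : Char) : Bool := c == 'K' || c == 'k'

-- per-character contribution to Quanlity ('000' if K/k, the char if a digit, else nothing)
def pvQJoin (c : Char) : List Char :=
  if pvIsK c then ['0', '0', '0'] else if PySem.Chars.isdigit c then [c] else []

def splitNumberString_alt (string : String) (count : Int) (list_coint : List String) : List (String × String) :=
  let cs := string.toList
  let quanlity := String.ofList (cs.flatMap pvQJoin)
  -- scan from the right, stopping at the first K/k (Python's reversed-loop with break)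
  let kept := cs.reverse.takeWhile (fun c => !pvIsK c)
  let coinType := String.ofList (kept.reverse.filter (fun c => !PySem.Chars.isdigit c))
  let numStr : PySem.Dict String String :=
    PySem.Dict.empty.insert ("Quanlity" ++ PySem.Int.toStr count) quanlity
  let numStr :=
    if list_coint.contains (PySem.Str.upper coinType) then
      numStr.insert ("CoinType" ++ PySem.Int.toStr count) coinType
    else numStr
  numStr.items

-- ===== PRECONDITION & SPEC =====
def Spec_splitNumberString (string : String) (count : Int) (list_coint : List String) (out : List (String × String)) : Prop := out = splitNumberString_alt string count list_coint
instance (string : String) (count : Int) (list_coint : List String) (out : List (String × String)) : Decidable (Spec_splitNumberString string count list_coint out) := by unfold Spec_splitNumberString; infer_instance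

-- ===== CLAIM (what is proved, stated in full; the proofs are below) =====
def Claim_equal_splitNumberString : Prop := ∀ (string : String) (count : Int) (list_coint : List String), Dom_splitNumberString string count list_coint → Spec_splitNumberString string count list_coint (splitNumberString string count list_coint)

-- ===== LEMMAS AND PROOFS =====

theorem pvToNat_ofNat (n : Nat) (h : n.isValidChar) : (Char.ofNat n).toNat = n := by
  unfold Char.ofNat
  split
  · rfl
  · simp_all

-- A's 'a.upper() == "K"' fires exactly on the two characters B tests for
theorem pvUpperK (c : Char) : (PySem.Chars.upperChar c = 'K') ↔ (pvIsK c = true) := by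
  simp only [PySem.Chars.upperChar, PySem.Chars.islower, pvIsK, Bool.or_eq_true, beq_iff_eq]
  constructor
  · intro h
    split_ifs at h with hl
    · right
      simp only [Bool.and_eq_true, decide_eq_true_eq, Char.le_def] at hl
      have h1 : 97 ≤ c.toNat := hl.1
      have h2 : c.toNat ≤ 122 := hl.2
      have hv : (c.toNat - 32).isValidChar := by
        left
        omega
      have := congrArg Char.toNat h
      rw [pvToNat_ofNat _ hv] at this
      have hc : c.toNat - 32 = 75 := this
      apply Char.ext
      apply UInt32.toNat_inj.mp
      show c.toNat = ('k' : Char).toNat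
      have hk : ('k' : Char).toNat = 107 := by decide
      rw [hk]
      omega
    · exact Or.inl h
  · rintro (rfl | rfl)
    · decide
    · decide

theorem pvIsK_not_digit (c : Char) (h : pvIsK c = true) : PySem.Chars.isdigit c = false := by
  simp only [pvIsK, Bool.or_eq_true, beq_iff_eq] at h
  rcases h with rfl | rfl <;> decide

-- takeWhile over a reversed list that still contains a stop character ignores what comes after
theorem pvTakeWhile_stop (p : Char → Bool) (l l' : List Char) (h : l.all p = false) :
    (l ++ l').takeWhile p = l.takeWhile p := by
  induction l with
  | nil => simp at h
  | cons x xs ih =>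
    by_cases hx : p x = true
    · simp only [List.all_cons, hx, Bool.true_and] at h
      simp [hx, ih h]
    · simp only [Bool.not_eq_true] at hx
      simp [hx]

theorem pvTakeWhile_all (p : Char → Bool) (l l' : List Char) (h : l.all p = true) :
    (l ++ l').takeWhile p = l ++ l'.takeWhile p := by
  induction l with
  | nil => simp
  | cons x xs ih =>
    simp only [List.all_cons, Bool.and_eq_true] at h
    simp [h.1, ih h.2]

-- the loop invariant: A's fold computed from any accumulators
theorem pvFoldA (cs : List Char) (q ct : List Char) :
    cs.foldl pvStepA (q, ct) =
      (q ++ cs.flatMap pvQJoin,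
       if cs.any pvIsK then
         ((cs.reverse.takeWhile (fun c => !pvIsK c)).reverse).filter (fun c => !PySem.Chars.isdigit c)
       else ct ++ cs.filter (fun c => !PySem.Chars.isdigit c)) := by
  induction cs generalizing q ct with
  | nil => simp
  | cons a cs ih =>
    have hstep : ∀ st : List Char × List Char, pvStepA st a =
        if pvIsK a then (st.1 ++ ['0','0','0'], ([] : List Char))
        else if PySem.Chars.isdigit a then (st.1 ++ [a], st.2) else (st.1, st.2 ++ [a]) := by
      intro st
      by_cases hK : pvIsK a = true
      · have hu : PySem.Chars.upperChar a = 'K' := (pvUpperK a).2 hK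
        simp [pvStepA, hu, hK, pvIsK_not_digit a hK]
      · have hu : ¬ PySem.Chars.upperChar a = 'K' := fun h => hK ((pvUpperK a).1 h)
        have hK' : pvIsK a = false := by simpa using hK
        by_cases hd : PySem.Chars.isdigit a = true
        · simp [pvStepA, hu, hK', hd]
        · simp [pvStepA, hu, hK', hd]
    rw [List.foldl_cons, hstep]
    by_cases hK : pvIsK a = true
    · rw [if_pos hK]
      rw [ih]
      have hq : pvQJoin a = ['0','0','0'] := by simp [pvQJoin, hK]
      rw [Prod.mk.injEq]
      refine ⟨?_, ?_⟩
      · simp [hq]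
      simp only [List.any_cons, hK, Bool.true_or, if_pos]
      by_cases hcs : cs.any pvIsK = true
      · rw [if_pos hcs]
        have : (cs.reverse ++ [a]).takeWhile (fun c => !pvIsK c) =
            cs.reverse.takeWhile (fun c => !pvIsK c) := by
          apply pvTakeWhile_stop
          rcases List.any_eq_true.1 hcs with ⟨x, hx, hpx⟩
          apply List.all_eq_false.2
          exact ⟨x, by simpa using hx, by simp [hpx]⟩
        simp [this]
      · rw [if_neg hcs]
        have : (cs.reverse ++ [a]).takeWhile (fun c => !pvIsK c) =
            cs.reverse ++ ([a].takeWhile (fun c => !pvIsK c)) := by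
          apply pvTakeWhile_all
          simp only [List.all_reverse]
          apply List.all_eq_true.2
          intro x hx
          by_contra hpx
          exact hcs (List.any_eq_true.2 ⟨x, hx, by simpa using hpx⟩)
        simp [this, hK]
    · rw [if_neg hK]
      have hq : pvQJoin a = if PySem.Chars.isdigit a then [a] else [] := by
        simp [pvQJoin, hK]
      have htail : cs.any pvIsK = true →
          (cs.reverse ++ [a]).takeWhile (fun c => !pvIsK c) =
            cs.reverse.takeWhile (fun c => !pvIsK c) := by
        intro hcs
        apply pvTakeWhile_stop
        rcases List.any_eq_true.1 hcs with ⟨x, hx, hpx⟩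
        apply List.all_eq_false.2
        exact ⟨x, by simpa using hx, by simp [hpx]⟩
      have htail2 : cs.any pvIsK = false →
          (cs.reverse ++ [a]).takeWhile (fun c => !pvIsK c) = cs.reverse ++ [a] := by
        intro hcs
        rw [pvTakeWhile_all]
        · simp [hK]
        · simp only [List.all_reverse]
          apply List.all_eq_true.2
          intro x hx
          by_contra hpx
          exact (Bool.eq_false_iff.1 hcs) (List.any_eq_true.2 ⟨x, hx, by simpa using hpx⟩)
      by_cases hd : PySem.Chars.isdigit a = true
      · rw [if_pos hd, ih]
        rw [Prod.mk.injEq]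
        refine ⟨?_, ?_⟩
        · simp [hq, hd]
        simp only [List.any_cons, hK, Bool.false_or]
        by_cases hcs : cs.any pvIsK = true
        · simp [hcs, htail hcs]
        · simp [hcs, hd]
      · rw [if_neg hd, ih]
        simp only [Bool.not_eq_true] at hd
        rw [Prod.mk.injEq]
        refine ⟨?_, ?_⟩
        · simp [hq, hd]
        simp only [List.any_cons, hK, Bool.false_or]
        by_cases hcs : cs.any pvIsK = true
        · simp [hcs, htail hcs]
        · simp [hcs, hd]

-- ===== VERDICT (by name: the statement is the Claim_ definition above) =====
theorem splitNumberString_spec : Claim_equal_splitNumberString := by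
  intro string count list_coint _
  unfold Spec_splitNumberString splitNumberString splitNumberString_alt
  rw [pvFoldA]
  by_cases h : string.toList.any pvIsK = true
  · simp [h]
  · have hall : string.toList.reverse.all (fun c => !pvIsK c) = true := by
      simp only [List.all_reverse]
      apply List.all_eq_true.2
      intro x hx
      by_contra hpx
      exact (Bool.eq_false_iff.1 (Bool.not_eq_true _ ▸ h)) (List.any_eq_true.2 ⟨x, hx, by simpa using hpx⟩)
    have hTW : List.takeWhile (fun c => !pvIsK c) string.toList.reverse = string.toList.reverse := by
      apply List.takeWhile_eq_self_iff.mpr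
      intro x hx
      exact List.all_eq_true.1 hall x hx
    simp [h, hTW]
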